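-- pv_equiv track=rewrite | github.com/mostafaelspagh0/problem-solving | codeforces/O. Five in One/solution.py | fifth
-- ===== SOURCE A (Python) =====
-- import math
--
-- def countDivisors(n):
--     ret = 0
--     for i in range(1, (int)(math.sqrt(n)) + 1):
--         if (n % i == 0):
--             ret += 1+(n / i != i)
--     return ret
--
-- def fifth(a):
--     x = [countDivisors(n) for n in a]
--     t = []
--     mC = -1
--     for i in range(len(x)):
--         if x[i] > mC:
--             t = [a[i]]
--             mC = x[i]
--         elif x[i] == mC:
--             t.append(a[i])
--     return max(t)
-- ===== SOURCE B (Python) =====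
-- def countDivisors(n):
--     # number of divisors via prime factorization: tau(p1^e1 * ... * pk^ek) = prod(ei + 1)
--     if n == 0:
--         return 0
--     total = 1
--     p = 2
--     while p * p <= n:
--         if n % p == 0:
--             e = 0
--             while n % p == 0:
--                 n //= p
--                 e += 1
--             total *= e + 1
--         p += 1
--     if n > 1:
--         total *= 2
--     return total
--
-- def fifth(a):
--     best = max(countDivisors(n) for n in a)
--     return max(n for n in a if countDivisors(n) == best)
-- ===== Notes on version B (the rewrite author's own statement) =====
-- stated objective: alternative
-- what changed: countDivisors now computes tau(n) by prime factorization (trial-dividing out each prime p, multiplying exponents+1, times 2 for a leftover prime residual) instead of counting divisor pairs i, n/i for i up to sqrt(n); fifth becomes two staged passes (max of the divisor counts, then max of the elements attaining that count) instead of the single running best-count/candidate-list loop.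
-- outside the precondition, e.g. on fifth([]): A raises ValueError, B raises ValueError; on fifth([-3]): A raises ValueError, B returns -3
import Mathlib
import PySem

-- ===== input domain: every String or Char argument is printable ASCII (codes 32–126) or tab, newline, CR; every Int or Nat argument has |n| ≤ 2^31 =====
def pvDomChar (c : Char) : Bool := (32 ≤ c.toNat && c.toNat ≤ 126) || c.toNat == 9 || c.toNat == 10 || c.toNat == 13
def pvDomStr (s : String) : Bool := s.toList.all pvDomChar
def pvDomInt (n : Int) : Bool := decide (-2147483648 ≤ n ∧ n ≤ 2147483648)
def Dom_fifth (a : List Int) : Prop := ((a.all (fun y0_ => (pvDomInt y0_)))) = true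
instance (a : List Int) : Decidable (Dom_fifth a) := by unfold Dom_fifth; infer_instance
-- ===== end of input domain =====

-- B computes the divisor count by prime factorization (product of exponent+1) instead of
-- counting divisor pairs up to sqrt(n), and picks the answer in two staged passes
-- (max count, then max element attaining it) instead of A's running best/candidates loop.


-- ===== PORT A =====
-- int(math.sqrt(n)) is ported as isqrt n.toNat (= Nat.sqrt n.toNat): exact for every 0 ≤ n ≤ 2^31 (Dom_fifth + Pre_fifth;
-- math.sqrt is correctly rounded and for n ≤ 2^31 the double result never crosses an integer).
-- 'n / i != i' is float division; under n % i == 0 and n ≤ 2^31 < 2^53 it is the exact integer n//i,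
-- ported as PySem.Int.floordiv n i ≠ i.
-- kernel-computable clone of Nat.sqrt's own Newton iteration (fuel bounds the strictly
-- decreasing guess; proved equal to Nat.sqrt in isqrt_eq below)
def isqrtIter (n : ℕ) : ℕ → ℕ → ℕ
  | 0, guess => guess
  | f + 1, guess =>
    let next := (guess + n / guess) / 2
    if next < guess then isqrtIter n f next else guess

def isqrt (n : ℕ) : ℕ :=
  if n ≤ 1 then n
  else isqrtIter n (1 <<< (n.log2 / 2 + 1) + 1) (1 <<< (n.log2 / 2 + 1))

def countDivisors (n : Int) : Int :=
  (PySem.List.pyRange 1 ((isqrt n.toNat : Int) + 1) 1).foldl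
    (fun ret i =>
      if PySem.Int.mod n i = 0 then
        ret + (1 + (if PySem.Int.floordiv n i ≠ i then (1 : Int) else 0))
      else ret) 0

def fifth (a : List Int) : Int :=
  let x := a.map countDivisors
  let st := (PySem.List.pyRange 0 (PySem.List.len x) 1).foldl
    (fun (s : List Int × Int) i =>
      let xi := PySem.List.pyGetD x i 0
      let ai := PySem.List.pyGetD a i 0
      if s.2 < xi then ([ai], xi)
      else if xi = s.2 then (s.1 ++ [ai], s.2)
      else s) ([], -1)
  -- max(t): ValueError on empty t (only when a = []), excluded by Pre_fifth
  (PySem.List.max? st.1 (fun y => y)).getD 0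

-- ===== PORT B =====
-- inner 'while n % p == 0: n //= p; e += 1' of Source B. fuel (an upper bound on the number of
-- divisions, here m.toNat) and the '2 ≤ p ∧ 1 ≤ m' part of the guard are totality guards only:
-- they hold at every call the loops below make, so behaviour matches the Python.
def stripFac (fuel : ℕ) (m p e : Int) : Int × Int :=
  match fuel with
  | 0 => (m, e)
  | f + 1 =>
    if 2 ≤ p ∧ 1 ≤ m ∧ PySem.Int.mod m p = 0 then
      stripFac f (PySem.Int.floordiv m p) p (e + 1)
    else (m, e)

-- outer 'while p * p <= n' loop of Source B; returns (residual n, total). fuel bounds the number of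
-- iterations (p grows by 1 each time and stays ≤ n while the loop runs); for m ≤ 0 the Python
-- condition p*p <= m is false too, so behaviour agrees on every input.
def facLoop (fuel : ℕ) (m p total : Int) : Int × Int :=
  match fuel with
  | 0 => (m, total)
  | f + 1 =>
    if 2 ≤ p ∧ 1 ≤ m ∧ p * p ≤ m then
      if PySem.Int.mod m p = 0 then
        facLoop f (stripFac m.toNat m p 0).1 (p + 1) (total * ((stripFac m.toNat m p 0).2 + 1))
      else facLoop f m (p + 1) total
    else (m, total)

def countDivisors_alt (n : Int) : Int :=
  if n = 0 then 0
  else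
    let r := facLoop n.toNat n 2 1
    if 1 < r.1 then r.2 * 2 else r.2

def fifth_alt (a : List Int) : Int :=
  -- max over an empty generator raises ValueError (a = []), excluded by Pre_fifth
  let best := (PySem.List.max? (a.map countDivisors_alt) (fun y => y)).getD 0
  (PySem.List.max? (a.filter (fun n => countDivisors_alt n == best)) (fun y => y)).getD 0

-- ===== PRECONDITION & SPEC =====
-- A raises ValueError on the empty list (max([])) and on any negative element (math.sqrt of a
-- negative number); Pre_ excludes exactly those inputs.
def Pre_fifth (a : List Int) : Prop := a ≠ [] ∧ ∀ n ∈ a, 0 ≤ n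
instance (a : List Int) : Decidable (Pre_fifth a) := by unfold Pre_fifth; infer_instance

def pvWitness_fifth : List Int := [12, 7, 18, 18, 1]

def Spec_fifth (a : List Int) (out : Int) : Prop := out = fifth_alt a
instance (a : List Int) (out : Int) : Decidable (Spec_fifth a out) := by unfold Spec_fifth; infer_instance

-- ===== CLAIM (what is proved, stated in full; the proofs are below) =====
def Claim_equal_fifth : Prop := ∀ (a : List Int), Dom_fifth a → Pre_fifth a → Spec_fifth a (fifth a)

-- ===== LEMMAS AND PROOFS =====

theorem isqrtIter_eq (n : ℕ) : ∀ (fuel guess : ℕ), guess < fuel →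
    isqrtIter n fuel guess = Nat.sqrt.iter n guess := by
  intro fuel
  induction fuel with
  | zero => omega
  | succ f ih =>
    intro guess hg
    rw [isqrtIter, Nat.sqrt.iter]
    by_cases h : (guess + n / guess) / 2 < guess
    · rw [if_pos h, dif_pos h]
      exact ih _ (by omega)
    · rw [if_neg h, dif_neg h]

theorem isqrt_eq (n : ℕ) : isqrt n = Nat.sqrt n := by
  rw [isqrt, Nat.sqrt]
  by_cases h : n ≤ 1
  · simp [h]
  · simp only [h, if_false]
    exact isqrtIter_eq n _ _ (by omega)

-- ---- A's sqrt-pair count equals the divisor count ----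

-- A's accumulate-if loop as a sum over the filtered range
theorem cd_fold (l : List Int) (n c : Int) :
    l.foldl (fun ret i => if PySem.Int.mod n i = 0 then
        ret + (1 + (if PySem.Int.floordiv n i ≠ i then (1 : Int) else 0)) else ret) c
      = c + ((l.filter (fun i => decide (PySem.Int.mod n i = 0))).map
          (fun i => 1 + (if PySem.Int.floordiv n i ≠ i then (1 : Int) else 0))).sum := by
  induction l generalizing c with
  | nil => simp
  | cons h t ih =>
    rw [List.foldl_cons, ih, List.filter_cons]
    by_cases hp : PySem.Int.mod n h = 0 <;> simp [hp, add_assoc]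

theorem weight_eq (n i : Int) (hi : 0 < i) (hd : PySem.Int.mod n i = 0) :
    (1 + (if PySem.Int.floordiv n i ≠ i then (1 : Int) else 0))
      = 2 - (if i * i = n then (1 : Int) else 0) := by
  have hdvd : i ∣ n := (PySem.Int.mod_eq_zero_iff_dvd n i).mp hd
  obtain ⟨k, hk⟩ := hdvd
  have hfd : PySem.Int.floordiv n i = k := by
    rw [PySem.Int.floordiv_eq_ediv_of_pos hi, hk, Int.mul_ediv_cancel_left _ (by omega)]
  have hiff : PySem.Int.floordiv n i = i ↔ i * i = n := by
    rw [hfd, hk]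
    constructor
    · rintro rfl; rfl
    · intro h; exact mul_left_cancel₀ (by omega) h.symm
  by_cases hsq : i * i = n
  · simp [hsq, hiff.mpr hsq]
  · have : PySem.Int.floordiv n i ≠ i := fun h => hsq (hiff.mp h)
    simp [hsq, this]

theorem sum_filter_map_range (s : ℕ) (f : ℕ → ℤ) (q : ℤ → Bool) (w : ℤ → ℤ) :
    ((((List.range s).map f).filter q).map w).sum
      = ∑ k ∈ Finset.range s, (if q (f k) then w (f k) else 0) := by
  induction s with
  | zero => simp
  | succ s ih =>
    rw [List.range_succ]
    simp only [List.map_append, List.filter_append, List.map_cons, List.map_nil,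
      List.filter_cons, List.filter_nil, List.sum_append, Finset.sum_range_succ, ih]
    by_cases hq : q (f s) <;> simp [hq]

-- the classical pairing: summing 2 for each divisor pair (i, N/i) with i ≤ √N
-- (1 when i·i = N) counts every divisor exactly once
theorem tau_sqrt (N : ℕ) (hN : 1 ≤ N) :
    ∑ k ∈ Finset.range (Nat.sqrt N),
        (if (k + 1) ∣ N then (if (k + 1) * (k + 1) = N then 1 else 2) else 0)
      = N.divisors.card := by
  have hre : ∑ i ∈ Finset.Ico 1 (Nat.sqrt N + 1), (if i ∣ N then (if i * i = N then 1 else 2) else 0)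
      = ∑ k ∈ Finset.range (Nat.sqrt N),
          (if (k + 1) ∣ N then (if (k + 1) * (k + 1) = N then 1 else 2) else 0) := by
    rw [Finset.sum_Ico_eq_sum_range]
    simp only [Nat.add_sub_cancel]
    exact Finset.sum_congr rfl (fun k _ => by rw [Nat.add_comm 1 k])
  rw [← hre, ← Finset.sum_filter]
  have hS : (Finset.Ico 1 (Nat.sqrt N + 1)).filter (· ∣ N)
      = N.divisors.filter (· ≤ Nat.sqrt N) := by
    ext i
    simp only [Finset.mem_filter, Finset.mem_Ico, Nat.mem_divisors, Nat.lt_succ_iff]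
    constructor
    · rintro ⟨⟨h1, h2⟩, h3⟩; exact ⟨⟨h3, by omega⟩, h2⟩
    · rintro ⟨⟨h1, _⟩, h2⟩
      exact ⟨⟨Nat.pos_of_dvd_of_pos h1 (by omega), h2⟩, h1⟩
  rw [hS]
  rw [← Finset.sum_filter_add_sum_filter_not (N.divisors.filter (· ≤ Nat.sqrt N))
    (fun i => i * i = N)]
  have hsq : ∑ i ∈ (N.divisors.filter (· ≤ Nat.sqrt N)).filter (fun i => i * i = N),
      (if i * i = N then 1 else 2) = ((N.divisors.filter (· ≤ Nat.sqrt N)).filter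
        (fun i => i * i = N)).card := by
    rw [Finset.sum_congr rfl (fun x hx => by
      simp only [Finset.mem_filter] at hx
      rw [if_pos hx.2])]
    simp
  have hne : ∑ i ∈ (N.divisors.filter (· ≤ Nat.sqrt N)).filter (fun i => ¬ i * i = N),
      (if i * i = N then 1 else 2) = 2 * ((N.divisors.filter (· ≤ Nat.sqrt N)).filter
        (fun i => ¬ i * i = N)).card := by
    rw [Finset.sum_congr rfl (fun x hx => by
      simp only [Finset.mem_filter] at hx
      rw [if_neg hx.2])]
    simp [Nat.mul_comm]
  rw [hsq, hne]
  -- the divisors above √N biject with the divisors below √N that are not √N itself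
  have hbij : ((N.divisors.filter (· ≤ Nat.sqrt N)).filter (fun i => ¬ i * i = N)).card
      = (N.divisors.filter (fun i => ¬ i ≤ Nat.sqrt N)).card := by
    apply Finset.card_bij' (fun i _ => N / i) (fun d _ => N / d)
    · intro i hi
      simp only [Finset.mem_filter, Nat.mem_divisors] at hi ⊢
      obtain ⟨⟨⟨hdvd, hN0⟩, hle⟩, hnsq⟩ := hi
      have hipos : 0 < i := Nat.pos_of_dvd_of_pos hdvd (by omega)
      refine ⟨⟨Nat.div_dvd_of_dvd hdvd, hN0⟩, ?_⟩
      intro hcon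
      -- N/i ≤ √N with i ≤ √N forces N = (√N)² and i = √N, i.e. i·i = N
      obtain ⟨c, rfl⟩ := hdvd
      have hc : i * c / i = c := Nat.mul_div_cancel_left c hipos
      rw [hc] at hcon
      have hs2 : Nat.sqrt (i * c) * Nat.sqrt (i * c) ≤ i * c := Nat.sqrt_le (i * c)
      have hspos : 0 < Nat.sqrt (i * c) := Nat.le_sqrt.mpr (by omega)
      have h1 : i * c ≤ Nat.sqrt (i * c) * c := Nat.mul_le_mul_right c hle
      have h2 : Nat.sqrt (i * c) * c ≤ Nat.sqrt (i * c) * Nat.sqrt (i * c) :=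
        Nat.mul_le_mul_left _ hcon
      have hic : i * c = Nat.sqrt (i * c) * Nat.sqrt (i * c) :=
        le_antisymm (le_trans h1 h2) hs2
      have hcs : c = Nat.sqrt (i * c) :=
        Nat.eq_of_mul_eq_mul_left hspos (by omega)
      have his : i = Nat.sqrt (i * c) :=
        Nat.eq_of_mul_eq_mul_right hspos (by rw [← hic, ← hcs])
      exact hnsq (by rw [hcs, ← his])
    · intro d hd
      simp only [Finset.mem_filter, Nat.mem_divisors] at hd ⊢
      obtain ⟨⟨hdvd, hN0⟩, hgt⟩ := hd
      rw [Nat.not_le] at hgt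
      have hdpos : 0 < d := Nat.pos_of_dvd_of_pos hdvd (by omega)
      have hdivle : N / d ≤ Nat.sqrt N := by
        have h1 : N / d ≤ N / (Nat.sqrt N + 1) := Nat.div_le_div_left hgt (by omega)
        have h2 : N / (Nat.sqrt N + 1) ≤ Nat.sqrt N := by
          have := Nat.lt_succ_sqrt N
          have := Nat.div_lt_iff_lt_mul (show 0 < Nat.sqrt N + 1 by omega)
            |>.mpr (by omega : N < (Nat.sqrt N + 1) * (Nat.sqrt N + 1))
          omega
        omega
      refine ⟨⟨⟨Nat.div_dvd_of_dvd hdvd, hN0⟩, hdivle⟩, ?_⟩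
      intro hcon
      -- (N/d)² = N would give d = N/d ≤ √N, contradicting √N < d
      obtain ⟨c, rfl⟩ := hdvd
      have hc : d * c / d = c := Nat.mul_div_cancel_left c hdpos
      rw [hc] at hcon hdivle
      have hc0 : 0 < c := by
        rcases Nat.eq_zero_or_pos c with h0 | h1
        · exact absurd (by rw [h0, Nat.mul_zero]) hN0
        · exact h1
      have : c = d := Nat.eq_of_mul_eq_mul_right hc0 hcon
      omega
    · intro i hi
      simp only [Finset.mem_filter, Nat.mem_divisors] at hi
      exact Nat.div_div_self hi.1.1.1 hi.1.1.2
    · intro d hd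
      simp only [Finset.mem_filter, Nat.mem_divisors] at hd
      exact Nat.div_div_self hd.1.1 hd.1.2
  rw [hbij]
  have hsplit : (N.divisors.filter (· ≤ Nat.sqrt N)).card
        + (N.divisors.filter (fun i => ¬ i ≤ Nat.sqrt N)).card = N.divisors.card :=
    Finset.card_filter_add_card_filter_not _
  have hsplit2 : ((N.divisors.filter (· ≤ Nat.sqrt N)).filter (fun i => i * i = N)).card
        + ((N.divisors.filter (· ≤ Nat.sqrt N)).filter (fun i => ¬ i * i = N)).card
      = (N.divisors.filter (· ≤ Nat.sqrt N)).card :=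
    Finset.card_filter_add_card_filter_not _
  omega

-- A's counter equals the divisor count of n
theorem cdA_tau (n : Int) (hn : 1 ≤ n) : countDivisors n = (n.toNat.divisors.card : ℤ) := by
  have hcast : ((n.toNat : ℕ) : ℤ) = n := Int.toNat_of_nonneg (by omega)
  unfold countDivisors
  rw [isqrt_eq, cd_fold, zero_add, PySem.List.pyRange_one]
  have hlen : (((Nat.sqrt n.toNat : ℤ) + 1) - 1).toNat = Nat.sqrt n.toNat := by omega
  rw [hlen]
  rw [sum_filter_map_range (Nat.sqrt n.toNat) (fun k => 1 + (k : ℤ))]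
  have hterm : ∀ k ∈ Finset.range (Nat.sqrt n.toNat),
      (if (decide (PySem.Int.mod n (1 + (k : ℤ)) = 0)) then
          (1 + (if PySem.Int.floordiv n (1 + (k : ℤ)) ≠ (1 + (k : ℤ)) then (1 : ℤ) else 0)) else 0)
        = ((if (k + 1) ∣ n.toNat then (if (k + 1) * (k + 1) = n.toNat then 1 else 2) else 0 : ℕ) : ℤ) := by
    intro k _
    have hi : (0 : ℤ) < 1 + (k : ℤ) := by omega
    have hdvd_iff : PySem.Int.mod n (1 + (k : ℤ)) = 0 ↔ (k + 1) ∣ n.toNat := by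
      rw [PySem.Int.mod_eq_zero_iff_dvd]
      rw [show (1 + (k : ℤ)) = ((k + 1 : ℕ) : ℤ) by push_cast; ring, ← hcast]
      exact Int.natCast_dvd_natCast
    by_cases hd : PySem.Int.mod n (1 + (k : ℤ)) = 0
    · rw [if_pos (by simpa using hd), if_pos (hdvd_iff.mp hd)]
      rw [weight_eq n _ hi hd]
      have hsq_iff : (1 + (k : ℤ)) * (1 + (k : ℤ)) = n ↔ (k + 1) * (k + 1) = n.toNat := by
        rw [show (1 + (k : ℤ)) = ((k + 1 : ℕ) : ℤ) by push_cast; ring, ← hcast]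
        exact ⟨fun h => by exact_mod_cast h, fun h => by exact_mod_cast h⟩
      by_cases hsq : (1 + (k : ℤ)) * (1 + (k : ℤ)) = n
      · rw [if_pos hsq, if_pos (hsq_iff.mp hsq)]; norm_num
      · rw [if_neg hsq, if_neg (fun hc => hsq (hsq_iff.mpr hc))]; norm_num
    · rw [if_neg (by simpa using hd), if_neg (fun hc => hd (hdvd_iff.mpr hc))]
      norm_num
  rw [Finset.sum_congr rfl hterm, ← Nat.cast_sum]
  exact_mod_cast congrArg (Nat.cast (R := ℤ)) (tau_sqrt n.toNat (by omega))

-- ---- B's factorization product equals the divisor count ----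

theorem stripFac_spec : ∀ (fuel : ℕ) (m p e : Int), m.toNat ≤ fuel → 1 ≤ m → 2 ≤ p →
    ∃ (k : ℕ) (m' : Int), stripFac fuel m p e = (m', e + k) ∧ m = p ^ k * m' ∧ ¬ (p ∣ m') ∧ 1 ≤ m' := by
  intro fuel
  induction fuel with
  | zero => intro m p e hf hm hp; omega
  | succ f ih =>
    intro m p e hf hm hp
    rw [stripFac]
    split
    · rename_i h
      obtain ⟨_, _, hd⟩ := h
      have hdvd : p ∣ m := (PySem.Int.mod_eq_zero_iff_dvd m p).mp hd
      have hmul : p * (m / p) = m := Int.mul_ediv_cancel' hdvd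
      have hc1 : 1 ≤ m / p := by nlinarith
      have hclt : m / p < m := by nlinarith
      have hfd : PySem.Int.floordiv m p = m / p :=
        PySem.Int.floordiv_eq_ediv_of_pos (by omega)
      obtain ⟨k, m', hrec, hfact, hnd, hm'⟩ := ih (m / p) p (e + 1) (by omega) hc1 hp
      refine ⟨k + 1, m', ?_, ?_, hnd, hm'⟩
      · rw [hfd, hrec]; congr 1; push_cast; ring
      · rw [← hmul, hfact]; ring
    · rename_i h
      refine ⟨0, m, by simp, by ring, ?_, hm⟩
      intro hdvd
      exact h ⟨hp, hm, (PySem.Int.mod_eq_zero_iff_dvd m p).mpr hdvd⟩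

-- residual of the outer loop once p*p exceeds it: 1 or a prime
theorem residual_prime (m p : Int) (hm : 1 ≤ m) (hp : 2 ≤ p) (hppm : m < p * p)
    (hinv : ∀ q : ℕ, q.Prime → (q : ℤ) ∣ m → p ≤ (q : ℤ)) :
    (1 : ℤ) < m → Nat.Prime m.toNat := by
  have hmcast : ((m.toNat : ℕ) : ℤ) = m := Int.toNat_of_nonneg (by omega)
  intro h1m
  by_contra hnp
  have hq := Nat.minFac_prime (show m.toNat ≠ 1 by omega)
  have hqsq := Nat.minFac_sq_le_self (show 0 < m.toNat by omega) hnp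
  have hqdvd : ((m.toNat.minFac : ℕ) : ℤ) ∣ m := by
    rw [← hmcast]
    exact_mod_cast Nat.minFac_dvd m.toNat
  have hge := hinv m.toNat.minFac hq hqdvd
  have : ((m.toNat.minFac : ℕ) : ℤ) * ((m.toNat.minFac : ℕ) : ℤ) ≤ m := by
    rw [← hmcast]
    exact_mod_cast (by nlinarith [hqsq] : m.toNat.minFac * m.toNat.minFac ≤ m.toNat)
  nlinarith

theorem facLoop_spec : ∀ (fuel : ℕ) (m p total : Int), m.toNat < fuel + p.toNat → 1 ≤ m → 2 ≤ p →
    (∀ q : ℕ, q.Prime → (q : ℤ) ∣ m → p ≤ (q : ℤ)) →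
    1 ≤ (facLoop fuel m p total).1 ∧
    ((1 : ℤ) < (facLoop fuel m p total).1 → Nat.Prime (facLoop fuel m p total).1.toNat) ∧
    (facLoop fuel m p total).2 * ((facLoop fuel m p total).1.toNat.divisors.card : ℤ)
      = total * (m.toNat.divisors.card : ℤ) := by
  intro fuel
  induction fuel with
  | zero =>
    intro m p total hF hm hp hinv
    have hppm : m < p * p := by nlinarith [show m < p by omega]
    exact ⟨hm, residual_prime m p hm hp hppm hinv, rfl⟩
  | succ f ih =>
    intro m p total hF hm hp hinv
    have hpcast : ((p.toNat : ℕ) : ℤ) = p := Int.toNat_of_nonneg (by omega)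
    have hmcast : ((m.toNat : ℕ) : ℤ) = m := Int.toNat_of_nonneg (by omega)
    rw [facLoop]
    split
    · rename_i hg
      obtain ⟨hp2, hm1, hpp⟩ := hg
      have hpm : p ≤ m := by nlinarith
      split
      · rename_i hd
        have hdvd : p ∣ m := (PySem.Int.mod_eq_zero_iff_dvd m p).mp hd
        obtain ⟨k, m', hstrip, hfact, hnd, hm'1⟩ :=
          stripFac_spec m.toNat m p 0 (le_refl _) hm1 hp2
        have hm'cast : ((m'.toNat : ℕ) : ℤ) = m' := Int.toNat_of_nonneg (by omega)
        -- p is prime: its least prime factor divides m, hence is ≥ p, hence is p itself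
        have hPp : Nat.Prime p.toNat := by
          have hne1 : p.toNat ≠ 1 := by omega
          have hqprime := Nat.minFac_prime hne1
          have hqdvd : ((p.toNat.minFac : ℕ) : ℤ) ∣ m := by
            refine dvd_trans ?_ hdvd
            rw [← hpcast]
            exact_mod_cast Nat.minFac_dvd p.toNat
          have hge := hinv p.toNat.minFac hqprime hqdvd
          have hle : p.toNat.minFac ≤ p.toNat := Nat.minFac_le (by omega)
          have : p.toNat.minFac = p.toNat := by omega
          exact this ▸ hqprime
        -- k ≥ 1 since p divides m
        have hk1 : 1 ≤ k := by
          rcases Nat.eq_zero_or_pos k with h0 | h1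
          · exfalso; apply hnd
            rw [h0, pow_zero, one_mul] at hfact
            exact hfact ▸ hdvd
          · exact h1
        -- residual bound for the fuel
        have hpk1 : 1 ≤ p ^ k := one_le_pow₀ (by omega)
        have hm'le : m' ≤ m := by nlinarith [hfact]
        have hinv' : ∀ q : ℕ, q.Prime → (q : ℤ) ∣ m' → p + 1 ≤ (q : ℤ) := by
          intro q hq hqd
          have hqm : (q : ℤ) ∣ m := hfact ▸ Dvd.dvd.mul_left hqd (p ^ k)
          have h1 := hinv q hq hqm
          have h2 : (q : ℤ) ≠ p := by
            intro hqp
            exact hnd (hqp ▸ hqd)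
          omega
        obtain ⟨A1, A2, A3⟩ := ih m' (p + 1)
          (total * (((stripFac m.toNat m p 0).2) + 1)) (by omega) hm'1 (by omega) hinv'
        rw [hstrip] at A1 A2 A3 ⊢
        dsimp only at A1 A2 A3 ⊢
        refine ⟨A1, A2, ?_⟩
        rw [A3]
        -- m.toNat = p.toNat^k * m'.toNat
        have hMeq : m.toNat = p.toNat ^ k * m'.toNat := by
          have hc : ((p.toNat ^ k * m'.toNat : ℕ) : ℤ) = m := by
            push_cast [hpcast, hm'cast]
            exact hfact.symm
          rw [← hc, Int.toNat_natCast]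
        have hnd' : ¬ (p.toNat ∣ m'.toNat) := by
          intro hdd
          apply hnd
          have hcast2 := Int.natCast_dvd_natCast.mpr hdd
          rwa [hpcast, hm'cast] at hcast2
        have hcop : Nat.Coprime (p.toNat ^ k) m'.toNat :=
          Nat.Coprime.pow_left k ((Nat.Prime.coprime_iff_not_dvd hPp).mpr hnd')
        rw [hMeq, Nat.Coprime.card_divisors_mul hcop]
        have hppow : (p.toNat ^ k).divisors.card = k + 1 := by
          rw [Nat.divisors_prime_pow hPp]
          simp
        rw [hppow]
        push_cast
        ring
      · rename_i hd
        have hinv' : ∀ q : ℕ, q.Prime → (q : ℤ) ∣ m → p + 1 ≤ (q : ℤ) := by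
          intro q hq hqd
          have h1 := hinv q hq hqd
          have h2 : (q : ℤ) ≠ p := by
            intro hqp
            exact hd ((PySem.Int.mod_eq_zero_iff_dvd m p).mpr (hqp ▸ hqd))
          omega
        exact ih m (p + 1) total (by omega) hm (by omega) hinv'
    · rename_i hg
      have hppm : m < p * p := by
        by_contra hc
        exact hg ⟨hp, hm, by omega⟩
      exact ⟨hm, residual_prime m p hm hp hppm hinv, rfl⟩

-- B's counter equals the divisor count of n
theorem cdB_tau (n : Int) (hn : 1 ≤ n) : countDivisors_alt n = (n.toNat.divisors.card : ℤ) := by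
  unfold countDivisors_alt
  rw [if_neg (by omega)]
  obtain ⟨B1, B2, B3⟩ := facLoop_spec n.toNat n 2 1 (by omega) hn (by norm_num)
    (fun q hq _ => by exact_mod_cast hq.two_le)
  dsimp only
  by_cases h1 : 1 < (facLoop n.toNat n 2 1).1
  · rw [if_pos h1]
    have hpr := B2 h1
    have hcard : (facLoop n.toNat n 2 1).1.toNat.divisors.card = 2 := by
      rw [Nat.Prime.divisors hpr]
      have hne : (1 : ℕ) ∉ ({(facLoop n.toNat n 2 1).1.toNat} : Finset ℕ) := by
        simp only [Finset.mem_singleton]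
        exact fun h => (Nat.Prime.one_lt hpr).ne' h.symm
      rw [Finset.card_insert_of_notMem hne, Finset.card_singleton]
    rw [hcard] at B3
    push_cast at B3 ⊢
    linarith
  · rw [if_neg h1]
    have hr1 : (facLoop n.toNat n 2 1).1 = 1 := by omega
    rw [hr1] at B3
    simpa [Nat.divisors_one] using B3

-- the two divisor counters agree on every nonnegative input (both equal the divisor count)
theorem cd_eq (n : Int) (hn : 0 ≤ n) : countDivisors n = countDivisors_alt n := by
  rcases eq_or_lt_of_le hn with h0 | h1
  · rw [← h0]; decide
  · rw [cdA_tau n (by omega), cdB_tau n (by omega)]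

theorem cd_nonneg (n : Int) (hn : 0 ≤ n) : 0 ≤ countDivisors n := by
  rcases eq_or_lt_of_le hn with h0 | h1
  · rw [← h0]; decide
  · rw [cdA_tau n (by omega)]; positivity

-- A's loop step over the element list (after index elimination)
def stepA (s : List Int × Int) (n : Int) : List Int × Int :=
  if s.2 < countDivisors n then ([n], countDivisors n)
  else if countDivisors n = s.2 then (s.1 ++ [n], s.2)
  else s

-- running maximum of the divisor counts
def cdmax (l : List Int) (m : Int) : Int := l.foldl (fun acc n => max acc (countDivisors n)) m

theorem foldA_char : ∀ (l t : List Int) (m : Int),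
    l.foldl stepA (t, m) =
      ((if m = cdmax l m then t else []) ++ l.filter (fun n => countDivisors n == cdmax l m),
       cdmax l m) := by
  intro l
  induction l with
  | nil => intro t m; simp [cdmax]
  | cons n rest ih =>
    intro t m
    have hM := PySem.List.le_foldl_max_int rest (fun x => countDivisors x) (max m (countDivisors n))
    simp only [List.foldl_cons]
    have hcm : cdmax (n :: rest) m = cdmax rest (max m (countDivisors n)) := rfl
    rcases lt_trichotomy m (countDivisors n) with hlt | heq | hgt
    · have hA : stepA (t, m) n = ([n], countDivisors n) := by
        simp only [stepA]; rw [if_pos hlt]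
      rw [hA, ih [n] (countDivisors n), hcm]
      have hmx : max m (countDivisors n) = countDivisors n := by omega
      rw [hmx] at hM ⊢
      have hmne : m ≠ cdmax rest (countDivisors n) := by
        have := hM.1; unfold cdmax; omega
      rw [if_neg hmne]
      simp only [List.filter_cons, List.nil_append]
      unfold cdmax
      split <;> simp <;> assumption
    · have hA : stepA (t, m) n = (t ++ [n], m) := by
        simp only [stepA]; rw [if_neg (by omega), if_pos heq.symm]
      rw [hA, ih (t ++ [n]) m, hcm]
      have hmx : max m (countDivisors n) = m := by omega
      rw [hmx] at hM ⊢
      simp only [List.filter_cons]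
      by_cases hh : m = cdmax rest m
      · rw [if_pos hh, if_pos hh]
        have : (countDivisors n == cdmax rest m) = true := by
          rw [beq_iff_eq]; omega
        rw [this]
        simp [cdmax]
      · rw [if_neg hh, if_neg hh]
        have : (countDivisors n == cdmax rest m) = false := by
          rw [beq_eq_false_iff_ne]; omega
        rw [this]
        simp [cdmax]
    · have hA : stepA (t, m) n = (t, m) := by
        simp only [stepA]; rw [if_neg (by omega), if_neg (by omega)]
      rw [hA, ih t m, hcm]
      have hmx : max m (countDivisors n) = m := by omega
      rw [hmx] at hM ⊢
      simp only [List.filter_cons]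
      have : (countDivisors n == cdmax rest m) = false := by
        rw [beq_eq_false_iff_ne]
        have := hM.1; unfold cdmax; omega
      rw [this]
      simp [cdmax]

-- A's index loop over range(len(x)) is the element loop stepA over a
theorem fifth_fold_eq (a : List Int) :
    fifth a = (PySem.List.max? (a.foldl stepA ([], -1)).1 (fun y => y)).getD 0 := by
  simp only [fifth, PySem.List.len_eq, List.length_map]
  rw [PySem.List.foldl_congr_mem' _ _
    (fun (s : List Int × Int) i => stepA s (PySem.List.pyGetD a i 0)) ([], -1)
    (by
      intro i hi s
      have hmem := (PySem.List.mem_pyRange_one).mp hi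
      have h0 : 0 ≤ i := hmem.1
      have hlt : i < (a.length : Int) := hmem.2
      have hx : PySem.List.pyGetD (a.map countDivisors) i 0
          = countDivisors (PySem.List.pyGetD a i 0) := by
        have h1 : PySem.List.pyGetD (a.map countDivisors) i 0
            = (a.map countDivisors)[i.toNat]'(by simp; omega) :=
          PySem.List.pyGetD_eq_getElem _ 0 (by omega) (by simp; omega)
        have h2 : PySem.List.pyGetD a i 0 = a[i.toNat]'(by omega) :=
          PySem.List.pyGetD_eq_getElem _ 0 (by omega) (by omega)
        rw [h1, h2, List.getElem_map]
      rw [hx]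
      rfl)]
  rw [PySem.List.foldl_pyRange_zero_pyGetD' a 0 stepA ([], (-1 : Int))]

-- ===== VERDICT (by name: the statement is the Claim_ definition above) =====
theorem fifth_spec : Claim_equal_fifth := by
  unfold Claim_equal_fifth
  intro a _ hpre
  unfold Spec_fifth
  obtain ⟨hne, hnn⟩ := hpre
  obtain ⟨h, tl, rfl⟩ : ∃ h tl, a = h :: tl := by
    cases a with
    | nil => exact absurd rfl hne
    | cons h tl => exact ⟨h, tl, rfl⟩
  rw [fifth_fold_eq]
  rw [foldA_char (h :: tl) [] (-1)]
  -- the overall maximal divisor count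
  have hM := PySem.List.le_foldl_max_int (h :: tl) (fun x => countDivisors x) (-1)
  have hh0 : 0 ≤ countDivisors h := cd_nonneg h (hnn h (by simp))
  have hmne : (-1 : Int) ≠ cdmax (h :: tl) (-1) := by
    have := hM.2 h (by simp)
    unfold cdmax; omega
  rw [if_neg hmne, List.nil_append]
  -- B's first pass computes the same maximum
  have hbest : (PySem.List.max? ((h :: tl).map countDivisors_alt) (fun y => y)).getD 0
      = cdmax (h :: tl) (-1) := by
    simp only [List.map_cons]
    rw [PySem.List.max?_id_cons]
    simp only [Option.getD_some]
    rw [List.foldl_map]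
    have hstep : tl.foldl (fun acc x => max acc (countDivisors_alt x)) (countDivisors_alt h)
        = tl.foldl (fun acc x => max acc (countDivisors x)) (countDivisors h) := by
      rw [← cd_eq h (hnn h (by simp))]
      exact (PySem.List.foldl_congr_mem tl _ _ _
        (by intro acc x hx; rw [← cd_eq x (hnn x (by simp [hx]))])).symm
    rw [hstep]
    unfold cdmax
    simp only [List.foldl_cons]
    congr 1
    omega
  -- B's filter is A's candidate list
  unfold fifth_alt
  rw [hbest]
  dsimp only
  rw [List.filter_congr (fun x hx => by rw [cd_eq x (hnn x hx)])]
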